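-- pv_equiv track=rewrite | github.com/Saharsh-R/adventofcode | y2024/d19/test_d19_y2024.py | get_p1
-- ===== SOURCE A (Python) =====
-- from functools import cache
--
-- def extract_towels(data: list[str]):
--     return data[0].split(', '), data[2:]
--
-- def get_p1(day_input: list[str]):
--     towels, data = extract_towels(day_input)
--     ans = 0
--
--     @cache
--     def can_form(pattern:str):
--         if not pattern:
--             return True
--         for t in towels:
--             if pattern.startswith(t):
--                 if can_form(pattern[ len(t):]):
--                     return True
--         return False
--
--     for x in data:
--         if can_form(x ):
--             ans += 1
--     return ans
-- ===== SOURCE B (Python) =====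
-- def get_p1(day_input: list[str]):
--     # Bottom-up tabulation: for each pattern fill dp[i] = "suffix pat[i:] is buildable"
--     # from right to left, instead of A's cached top-down recursion.
--     towels = day_input[0].split(', ')
--     ans = 0
--     for pat in day_input[2:]:
--         n = len(pat)
--         dp = [False] * (n + 1)
--         dp[n] = True
--         for i in range(n - 1, -1, -1):
--             dp[i] = any(pat.startswith(t, i) and dp[i + len(t)] for t in towels)
--         if dp[0]:
--             ans += 1
--     return ans
-- ===== Notes on version B (the rewrite author's own statement) =====
-- stated objective: alternative
-- what changed: A decides each pattern by cached top-down recursion over suffixes; B fills a boolean table dp[i] ('suffix pat[i:] is buildable') right to left with startswith(t, i) offset checks, so each pattern is one iterative pass over positions with no recursion, no memo dict and no suffix slicing.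
-- outside the precondition, e.g. on get_p1(['a, , a', '', 'a']): A returns 1, B returns 1
import Mathlib
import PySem

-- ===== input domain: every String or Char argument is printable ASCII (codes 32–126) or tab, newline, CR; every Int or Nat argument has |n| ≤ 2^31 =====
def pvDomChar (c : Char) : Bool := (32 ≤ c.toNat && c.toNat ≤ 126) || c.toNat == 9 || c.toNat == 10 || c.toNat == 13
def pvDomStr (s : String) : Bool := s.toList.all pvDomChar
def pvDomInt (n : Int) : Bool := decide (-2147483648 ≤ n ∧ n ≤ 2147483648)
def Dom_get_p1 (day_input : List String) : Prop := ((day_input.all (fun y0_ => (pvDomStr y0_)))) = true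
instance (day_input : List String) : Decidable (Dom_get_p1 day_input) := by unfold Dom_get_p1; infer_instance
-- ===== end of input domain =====

-- B replaces A's cached top-down recursion per pattern by an iterative right-to-left
-- boolean table over positions (objective: alternative — an explicit tabulation in place
-- of recursion with memoisation).

-- ===== PORT A =====
-- can_form(pattern): @cache only memoizes (same values); ported as plain recursion.
mutual
  def canFormA (all : List (List Char)) (pattern : List Char) : Bool :=
    if pattern = [] then true
    else loopA all pattern all
  termination_by (pattern.length, all.length + 1)

  -- the 'for t in towels' loop inside can_form
  def loopA (all : List (List Char)) (pattern : List Char) : List (List Char) → Bool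
    | [] => false
    | t :: ts =>
      if hp : t.isPrefixOf pattern then
        if ht : t = [] then loopA all pattern ts
          -- Python recurses on the unchanged pattern here and never terminates;
          -- Pre_get_p1 excludes the empty towel, so this branch is unreachable.
        else if canFormA all (pattern.drop t.length) then true else loopA all pattern ts
      else loopA all pattern ts
  termination_by ts => (pattern.length, ts.length)
  decreasing_by
    · exact Prod.Lex.right _ (by simp)
    · apply Prod.Lex.left
      have hle := (List.isPrefixOf_iff_prefix.mp hp).length_le
      have hpos : 0 < t.length := List.length_pos_of_ne_nil ht
      simp only [List.length_drop]; omega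
    · exact Prod.Lex.right _ (by simp)
    · exact Prod.Lex.right _ (by simp)
end

def get_p1 (day_input : List String) : Int :=
  match day_input with
  | [] => 0  -- Python: day_input[0] raises IndexError; excluded by Pre_get_p1
  | first :: _ =>
    let towels := PySem.Chars.splitOn first.toList ", ".toList  -- data[0].split(', ')
    let data := day_input.drop 2                                 -- data[2:]
    data.foldl (fun ans x => if canFormA towels x.toList then ans + 1 else ans) (0 : Int)

-- ===== PORT B =====
-- dpB towels pat = [dp[0], …, dp[n]] of Source B, built right to left; entry i says
-- "pat[i:] is buildable".  For t = '' Python reads dp[i], still its initial False.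
def dpB (towels : List (List Char)) : List Char → List Bool
  | [] => [true]
  | c :: rest =>
    let ds := dpB towels rest
    (towels.any fun t =>
      t.isPrefixOf (c :: rest) && (if t = [] then false else ds.getD (t.length - 1) false)) :: ds

def get_p1_alt (day_input : List String) : Int :=
  match day_input with
  | [] => 0  -- Python: day_input[0] raises IndexError; excluded by Pre_get_p1
  | first :: _ =>
    let towels := PySem.Chars.splitOn first.toList ", ".toList
    (day_input.drop 2).foldl
      (fun ans pat => if (dpB towels pat.toList).headD false then ans + 1 else ans) (0 : Int)

-- ===== PRECONDITION & SPEC =====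
-- Pre_ excludes the empty input list (A raises IndexError on day_input[0]) and inputs whose
-- towel line yields an empty-string towel while some pattern line is non-empty, on which A's
-- recursion can call itself on an unchanged pattern and die of RecursionError (though on some
-- such inputs it still returns).
def Pre_get_p1 (day_input : List String) : Prop :=
  day_input ≠ [] ∧
    ([] ∉ PySem.Chars.splitOn (day_input.headD "").toList ", ".toList ∨
      ∀ pat ∈ day_input.drop 2, pat = "")
instance (day_input : List String) : Decidable (Pre_get_p1 day_input) := by
  unfold Pre_get_p1; infer_instance
def pvWitness_get_p1 : List String := ["r, wr, b", "", "rwr", "bx"]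

def Spec_get_p1 (day_input : List String) (out : Int) : Prop := out = get_p1_alt day_input
instance (day_input : List String) (out : Int) : Decidable (Spec_get_p1 day_input out) := by
  unfold Spec_get_p1; infer_instance

-- ===== CLAIM (what is proved, stated in full; the proofs are below) =====
def Claim_equal_get_p1 : Prop := ∀ (day_input : List String), Dom_get_p1 day_input → Pre_get_p1 day_input → Spec_get_p1 day_input (get_p1 day_input)

-- ===== LEMMAS AND PROOFS =====

-- reading the table at offset i is reading the head of the table of the dropped suffix
theorem dpB_getD (all : List (List Char)) :
    ∀ (i : Nat) (p : List Char), i ≤ p.length →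
      (dpB all p).getD i false = (dpB all (p.drop i)).headD false := by
  intro i
  induction i with
  | zero =>
    intro p _
    cases p <;> simp [dpB]
  | succ i ih =>
    intro p hp
    cases p with
    | nil => simp at hp
    | cons c rest =>
      simp only [dpB, List.drop_succ_cons, List.getD_cons_succ]
      exact ih rest (by simpa using hp)

-- the towel loop of can_form as a single List.any
theorem loopA_eq_any (all : List (List Char)) (p : List Char) :
    ∀ ts : List (List Char), loopA all p ts =
      ts.any fun t => t.isPrefixOf p && !t.isEmpty && canFormA all (p.drop t.length) := by
  intro ts
  induction ts with
  | nil => simp [loopA]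
  | cons t ts ih =>
    rw [loopA]
    by_cases hp : t.isPrefixOf p
    · by_cases ht : t = []
      · subst ht; simp [hp, ih]
      · have : t.isEmpty = false := by simpa using ht
        by_cases hc : canFormA all (p.drop t.length) <;> simp [hp, ht, hc, this, ih]
    · simp [hp, ih]

-- main correspondence: the head of B's table is A's can_form, for empty-free towels
theorem dpB_headD_eq (all : List (List Char)) (hne : ∀ t ∈ all, t ≠ ([] : List Char)) :
    ∀ (p : List Char), (dpB all p).headD false = canFormA all p := by
  have H : ∀ (n : Nat) (p : List Char), p.length ≤ n →
      (dpB all p).headD false = canFormA all p := by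
    intro n
    induction n with
    | zero =>
      intro p hp
      have : p = [] := List.eq_nil_of_length_eq_zero (Nat.le_zero.mp hp)
      subst this; simp [dpB, canFormA]
    | succ n ih =>
      intro p hp
      cases p with
      | nil => simp [dpB, canFormA]
      | cons c rest =>
        rw [canFormA]
        simp only [reduceCtorEq, if_false, loopA_eq_any]
        simp only [dpB, List.headD_cons]
        apply PySem.List.any_congr_mem
        intro t ht
        have htne : t ≠ [] := hne t ht
        have htE : t.isEmpty = false := by simpa using htne
        by_cases hpref : t.isPrefixOf (c :: rest)
        · have hle := (List.isPrefixOf_iff_prefix.mp hpref).length_le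
          simp only [List.length_cons] at hle
          have hpos : 0 < t.length := List.length_pos_of_ne_nil htne
          simp only [hpref, htE, htne, if_false, Bool.true_and, Bool.not_false]
          rw [dpB_getD all (t.length - 1) rest (by omega)]
          obtain ⟨k, hk⟩ : ∃ k, t.length = k + 1 := ⟨t.length - 1, by omega⟩
          rw [hk]
          simp only [Nat.add_sub_cancel, List.drop_succ_cons]
          exact ih (rest.drop k) (by simp only [List.length_drop]
                                     simp only [List.length_cons] at hp; omega)
        · simp [hpref]
  exact fun p => H p.length p le_rfl

-- ===== VERDICT (by name: the statement is the Claim_ definition above) =====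
theorem get_p1_spec : Claim_equal_get_p1 := by
  intro day_input _ hpre
  obtain ⟨hnil, hmem⟩ := hpre
  unfold Spec_get_p1
  cases day_input with
  | nil => exact absurd rfl hnil
  | cons first rest =>
    simp only [get_p1, get_p1_alt]
    apply PySem.List.foldl_congr_mem
    intro acc x hx
    rcases hmem with hmem | hall
    · simp only [List.headD_cons] at hmem
      rw [dpB_headD_eq _ (fun t ht h => hmem (h ▸ ht)) x.toList]
    · have hx0 : x = "" := hall x hx
      subst hx0
      simp [canFormA, dpB]
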